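-- pv_equiv track=rewrite | github.com/drakawa/reconf_route | rtgen_rr/validate_ecdg2_woacy_copy.py | select_channels_to_add
-- ===== SOURCE A (Python) =====
-- def select_channels_to_add(tmp_n, cands, escape_channels):
--     if len(cands) == 0:
--         return dict()
--     order_parallel_escape = max(escape_channels[tmp_n].values())
--     to_adds = {k:v for k,v in cands.items() if v >= order_parallel_escape}
--     if len(to_adds) > 0:
--         return to_adds
--     else:
--         order_max = max(cands.values())
--         to_adds = {k:v for k,v in cands.items() if v == order_max}
--         return to_adds
-- ===== SOURCE B (Python) =====
-- def select_channels_to_add(tmp_n, cands, escape_channels):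
--     if len(cands) == 0:
--         return dict()
--     threshold = max(escape_channels[tmp_n].values())
--     ge = {}
--     best = None
--     best_items = {}
--     for k, v in cands.items():
--         if v >= threshold:
--             ge[k] = v
--         if best is None or v > best:
--             best = v
--             best_items = {k: v}
--         elif v == best:
--             best_items[k] = v
--     return ge if ge else best_items
-- ===== Notes on version B (the rewrite author's own statement) =====
-- stated objective: alternative
-- what changed: B replaces A's staged passes (max over cands, two filter comprehensions, emptiness test) by one single pass over cands with an accumulator that simultaneously builds the above-threshold dict and a running maximum with its set of argmax items, then returns whichever applies.
import Mathlib
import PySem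

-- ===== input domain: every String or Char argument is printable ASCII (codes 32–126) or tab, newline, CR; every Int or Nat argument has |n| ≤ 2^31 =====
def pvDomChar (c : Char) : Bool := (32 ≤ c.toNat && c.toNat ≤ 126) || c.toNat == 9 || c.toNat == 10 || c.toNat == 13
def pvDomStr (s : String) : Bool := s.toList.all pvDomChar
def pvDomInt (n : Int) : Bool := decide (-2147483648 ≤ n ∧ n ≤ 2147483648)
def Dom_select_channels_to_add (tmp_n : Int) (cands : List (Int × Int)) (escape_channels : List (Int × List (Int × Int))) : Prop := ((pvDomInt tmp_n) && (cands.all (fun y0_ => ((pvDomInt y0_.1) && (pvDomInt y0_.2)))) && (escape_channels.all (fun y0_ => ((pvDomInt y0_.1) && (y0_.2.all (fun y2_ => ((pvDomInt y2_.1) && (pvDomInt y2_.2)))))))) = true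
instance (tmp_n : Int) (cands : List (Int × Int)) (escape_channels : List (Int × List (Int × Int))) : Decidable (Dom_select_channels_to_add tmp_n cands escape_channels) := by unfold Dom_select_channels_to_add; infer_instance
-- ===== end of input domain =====

-- B replaces A's staged passes (filter, emptiness test, max, filter) by one single pass over
-- cands accumulating the above-threshold dict and a running max with its argmax items (objective: alternative).


-- ===== PORT A =====
-- literal transliteration of A: build the threshold-filtered dict, return it if nonempty,
-- otherwise filter by the maximum of cands' values.
def select_channels_to_add (tmp_n : Int) (cands : List (Int × Int)) (escape_channels : List (Int × List (Int × Int))) : List (Int × Int) :=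
  if cands.length == 0 then []
  else
    match (PySem.Dict.mk escape_channels).get? tmp_n with   -- escape_channels[tmp_n]; none = KeyError (outside Pre_)
    | none => []
    | some esc =>
      match PySem.List.max? (esc.map Prod.snd) (fun y => y) with  -- max(...); none = ValueError on empty (outside Pre_)
      | none => []
      | some order_parallel_escape =>
        let to_adds := cands.filter (fun kv => decide (order_parallel_escape ≤ kv.2))
        if 0 < to_adds.length then to_adds
        else
          match PySem.List.max? (cands.map Prod.snd) (fun y => y) with
          | none => []   -- unreachable: cands ≠ []
          | some order_max => cands.filter (fun kv => kv.2 == order_max)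

-- ===== PORT B =====
-- one loop step of B: append to the ≥-threshold dict, and maintain (best, best_items) as a
-- running maximum with reset — exactly Source B's loop body.
def sctaStep (t : Int) (st : List (Int × Int) × Option Int × List (Int × Int)) (kv : Int × Int) :
    List (Int × Int) × Option Int × List (Int × Int) :=
  let ge := if t ≤ kv.2 then st.1 ++ [kv] else st.1
  match st.2.1 with
  | none => (ge, some kv.2, [kv])
  | some b =>
    if b < kv.2 then (ge, some kv.2, [kv])
    else if kv.2 == b then (ge, some b, st.2.2 ++ [kv])
    else (ge, some b, st.2.2)

def select_channels_to_add_alt (tmp_n : Int) (cands : List (Int × Int)) (escape_channels : List (Int × List (Int × Int))) : List (Int × Int) :=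
  if cands.length == 0 then []
  else
    match (PySem.Dict.mk escape_channels).get? tmp_n with   -- escape_channels[tmp_n]; none = KeyError (outside Pre_)
    | none => []
    | some esc =>
      match PySem.List.max? (esc.map Prod.snd) (fun y => y) with  -- max(...); none = ValueError on empty (outside Pre_)
      | none => []
      | some threshold =>
        let st := cands.foldl (sctaStep threshold) ([], none, [])
        if st.1 ≠ [] then st.1 else st.2.2

-- ===== PRECONDITION & SPEC =====
-- Pre_ excludes exactly the inputs where A raises: cands nonempty while escape_channels has
-- no key tmp_n (KeyError) or escape_channels[tmp_n] is empty (ValueError on max()).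
def Pre_select_channels_to_add (tmp_n : Int) (cands : List (Int × Int)) (escape_channels : List (Int × List (Int × Int))) : Prop :=
  cands = [] ∨ ((PySem.Dict.mk escape_channels).get? tmp_n).getD [] ≠ []
instance (tmp_n : Int) (cands : List (Int × Int)) (escape_channels : List (Int × List (Int × Int))) : Decidable (Pre_select_channels_to_add tmp_n cands escape_channels) := by unfold Pre_select_channels_to_add; infer_instance

def pvWitness_select_channels_to_add : Int × (List (Int × Int)) × (List (Int × List (Int × Int))) :=
  (0, [(1, 2), (3, 5)], [(0, [(7, 3)]), (1, [(2, 9)])])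

def Spec_select_channels_to_add (tmp_n : Int) (cands : List (Int × Int)) (escape_channels : List (Int × List (Int × Int))) (out : List (Int × Int)) : Prop := out = select_channels_to_add_alt tmp_n cands escape_channels
instance (tmp_n : Int) (cands : List (Int × Int)) (escape_channels : List (Int × List (Int × Int))) (out : List (Int × Int)) : Decidable (Spec_select_channels_to_add tmp_n cands escape_channels out) := by unfold Spec_select_channels_to_add; infer_instance

-- ===== CLAIM (what is proved, stated in full; the proofs are below) =====
def Claim_equal_select_channels_to_add : Prop := ∀ (tmp_n : Int) (cands : List (Int × Int)) (escape_channels : List (Int × List (Int × Int))), Dom_select_channels_to_add tmp_n cands escape_channels → Pre_select_channels_to_add tmp_n cands escape_channels → Spec_select_channels_to_add tmp_n cands escape_channels (select_channels_to_add tmp_n cands escape_channels)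

-- ===== LEMMAS AND PROOFS =====

-- B's fold, started in a state with a running maximum b, computes: the ≥-threshold filter
-- appended to g, the overall maximum, and the argmax items (kept from a iff b stays maximal).
lemma scta_fold (t : Int) (l : List (Int × Int)) (g a : List (Int × Int)) (b : Int) :
    l.foldl (sctaStep t) (g, some b, a) =
      (g ++ l.filter (fun kv => decide (t ≤ kv.2)),
       some ((l.map Prod.snd).foldl max b),
       (if (l.map Prod.snd).foldl max b = b then a else []) ++
         l.filter (fun kv => kv.2 == (l.map Prod.snd).foldl max b)) := by
  induction l generalizing g a b with
  | nil => simp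
  | cons kv rest ih =>
    have h0 := (PySem.List.le_foldl_max (rest.map Prod.snd) (max b kv.2)).1
    have hub : b ≤ (rest.map Prod.snd).foldl max (max b kv.2) :=
      le_trans (le_max_left b kv.2) h0
    have hub2 : kv.2 ≤ (rest.map Prod.snd).foldl max (max b kv.2) :=
      le_trans (le_max_right b kv.2) h0
    rw [List.foldl_cons, List.map_cons, List.foldl_cons]
    rcases lt_trichotomy b kv.2 with h | h | h
    · have hmax : max b kv.2 = kv.2 := max_eq_right (le_of_lt h)
      rw [hmax] at hub hub2 ⊢
      have hstep : sctaStep t (g, some b, a) kv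
          = ((if t ≤ kv.2 then g ++ [kv] else g), some kv.2, [kv]) := by
        simp [sctaStep, h]
      rw [hstep, ih]
      have hne : ¬ ((rest.map Prod.snd).foldl max kv.2 = b) := by omega
      rw [List.filter_cons, List.filter_cons, if_neg hne]
      simp only [Prod.mk.injEq, List.nil_append]
      refine ⟨?_, by simp, ?_⟩
      · split_ifs <;> simp_all <;> omega
      · by_cases hf : (rest.map Prod.snd).foldl max kv.2 = kv.2
        · simp [hf]
        · have : kv.2 ≠ (rest.map Prod.snd).foldl max kv.2 := by omega
          simp [this, hf]
    · have hmax : max b kv.2 = b := max_eq_left (le_of_eq h.symm)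
      rw [hmax] at hub hub2 ⊢
      have hstep : sctaStep t (g, some b, a) kv
          = ((if t ≤ kv.2 then g ++ [kv] else g), some b, a ++ [kv]) := by
        simp [sctaStep, h]
      rw [hstep, ih]
      rw [List.filter_cons, List.filter_cons]
      simp only [Prod.mk.injEq]
      refine ⟨?_, by simp, ?_⟩
      · split_ifs <;> simp_all <;> omega
      · subst h
        by_cases hf : (rest.map Prod.snd).foldl max kv.2 = kv.2
        · simp [hf]
        · have : kv.2 ≠ (rest.map Prod.snd).foldl max kv.2 := by omega
          simp [hf, this]
    · have hmax : max b kv.2 = b := max_eq_left (le_of_lt h)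
      rw [hmax] at hub hub2 ⊢
      have hstep : sctaStep t (g, some b, a) kv
          = ((if t ≤ kv.2 then g ++ [kv] else g), some b, a) := by
        have hne : (kv.2 == b) = false := by simp; omega
        simp [sctaStep, hne, not_lt_of_gt h]
      rw [hstep, ih]
      rw [List.filter_cons, List.filter_cons]
      simp only [Prod.mk.injEq]
      refine ⟨?_, by simp, ?_⟩
      · split_ifs <;> simp_all <;> omega
      · have : kv.2 ≠ (rest.map Prod.snd).foldl max b := by omega
        simp [this]

-- the threshold filter is nonempty iff the threshold does not exceed the maximum of cands' values
lemma filter_ge_nonempty_iff (cands : List (Int × Int)) (t m : Int)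
    (hm : PySem.List.max? (cands.map Prod.snd) (fun y => y) = some m) :
    0 < (cands.filter (fun kv => decide (t ≤ kv.2))).length ↔ t ≤ m := by
  constructor
  · intro h
    obtain ⟨kv, hkv⟩ := List.exists_mem_of_length_pos h
    have hmem := List.mem_filter.mp hkv
    have hle : t ≤ kv.2 := by simpa using hmem.2
    have hmax := PySem.List.max?_isMax hm kv.2 (List.mem_map_of_mem hmem.1)
    exact le_trans hle hmax
  · intro h
    have hmem : m ∈ cands.map Prod.snd := PySem.List.max?_mem hm
    obtain ⟨kv, hkv, hsnd⟩ := List.mem_map.mp hmem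
    have : kv ∈ cands.filter (fun kv => decide (t ≤ kv.2)) :=
      List.mem_filter.mpr ⟨hkv, by simpa [hsnd] using h⟩
    exact List.length_pos_of_mem this

-- ===== VERDICT (by name: the statement is the Claim_ definition above) =====
theorem select_channels_to_add_spec : Claim_equal_select_channels_to_add := by
  intro tmp_n cands escape_channels _ hpre
  unfold Spec_select_channels_to_add select_channels_to_add select_channels_to_add_alt
  cases cands with
  | nil => simp
  | cons kv0 rest =>
    have hlen : ((kv0 :: rest).length == 0) = false := by simp
    rw [hlen]
    simp only [Bool.false_eq_true, if_false]
    rcases hpre with h | hesc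
    · exact absurd h (by simp)
    cases hget : (PySem.Dict.mk escape_channels).get? tmp_n with
    | none => simp [hget] at hesc
    | some esc =>
      rw [hget] at hesc
      simp only [Option.getD_some] at hesc
      cases ht : PySem.List.max? (esc.map Prod.snd) (fun y => y) with
      | none =>
        cases esc with
        | nil => exact absurd rfl hesc
        | cons e etl =>
          rw [List.map_cons, PySem.List.max?_id_cons _ _] at ht
          exact absurd ht (Option.some_ne_none _)
      | some t =>
        -- maximum of cands' values, in both shapes
        have hmm : PySem.List.max? ((kv0 :: rest).map Prod.snd) (fun y => y)
            = some ((rest.map Prod.snd).foldl max kv0.2) := by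
          rw [List.map_cons]
          exact PySem.List.max?_id_cons _ _
        set M := (rest.map Prod.snd).foldl max kv0.2 with hM
        -- B's fold
        have hfold : (kv0 :: rest).foldl (sctaStep t) ([], none, []) =
            ((kv0 :: rest).filter (fun kv => decide (t ≤ kv.2)),
             some M,
             (if M = kv0.2 then [kv0] else []) ++
               rest.filter (fun kv => kv.2 == M)) := by
          rw [List.foldl_cons]
          have hstep0 : sctaStep t ([], none, []) kv0
              = ((if t ≤ kv0.2 then [kv0] else []), some kv0.2, [kv0]) := by
            simp [sctaStep]
          rw [hstep0, scta_fold, ← hM, List.filter_cons]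
          simp only [decide_eq_true_eq]
          split_ifs <;> simp
        dsimp only
        rw [ht]
        dsimp only
        rw [hmm, hfold]
        dsimp only
        have hfcons : (kv0 :: rest).filter (fun kv => kv.2 == M) =
            (if M = kv0.2 then [kv0] else []) ++ rest.filter (fun kv => kv.2 == M) := by
          rw [List.filter_cons]
          by_cases hf : M = kv0.2
          · have hb : (kv0.2 == M) = true := by simp [hf]
            simp [hb, hf]
          · have hb : (kv0.2 == M) = false := by
              simp only [beq_eq_false_iff_ne, ne_eq]
              omega
            simp [hb, hf]
        by_cases hle : t ≤ M
        · have hpos := (filter_ge_nonempty_iff (kv0 :: rest) t M hmm).mpr hle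
          have hne : (kv0 :: rest).filter (fun kv => decide (t ≤ kv.2)) ≠ [] := by
            intro h0; rw [h0] at hpos; simp at hpos
          rw [if_pos hpos, if_pos hne]
        · have hpos : ¬ 0 < ((kv0 :: rest).filter (fun kv => decide (t ≤ kv.2))).length := by
            intro h; exact hle ((filter_ge_nonempty_iff (kv0 :: rest) t M hmm).mp h)
          have hnil : (kv0 :: rest).filter (fun kv => decide (t ≤ kv.2)) = [] := by
            cases hx : (kv0 :: rest).filter (fun kv => decide (t ≤ kv.2)) with
            | nil => rfl
            | cons a l => rw [hx] at hpos; simp at hpos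
          rw [if_neg hpos, if_neg (not_ne_iff.mpr hnil)]
          exact hfcons
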